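-- pv_equiv track=rewrite | github.com/kaspermunch/bioinf-prog-course | programming_projects/orfproject/orfproject_solution.py | find_next_stop_codon
-- ===== SOURCE A (Python) =====
-- stop_codons = ['TAG', 'TGA', 'TAA']
--
-- def find_next_codon(seq, start, codon):
--     # loop over a list of indexes generated by range.
--     # from start to, but not including, len(seq), in jumps of 3
--     for i in range(start, len(seq)-2, 3):
--         # check if the current position is the start codon we look for:
--         if seq[i:i+3] == codon:
--             # return the start position of thet codon - ending the function:
--             return i
--     # If we get this far it means that we did not find the codon we where looking for so
--     # we return None. However, a function that does not explicitly return something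
--     # defaults to returning None. So it is not scrictly necessary
--     return None
--
-- def find_next_stop_codon(seq, start):
--     # uppercase the sequence:
--     seq = seq.upper()
--     # define a list for temporary restults:
--     results = []
--     # loop over the different stop codons:
--     for stop_codon in stop_codons:
--         # find the start position of the next stop codon:
--         pos = find_next_codon(seq, start, stop_codon)
--         # check that pos is not None, which would indicate that the codon was not found:
--         if pos != None:
--             # append the start position of the codon to the list of temporary retults.
--             results.append(pos)
--     if len(results) > 0:
--         # if we found the position of one or more stop codons we return the smallest (closet) one:
--         return min(results)
--     else:
--         # if we did not find any stop codons we return None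
--         return None
-- ===== SOURCE B (Python) =====
-- STOP_CODONS = {'TAG', 'TGA', 'TAA'}
--
-- def find_next_stop_codon(seq, start):
--     seq = seq.upper()
--     for i in range(start, len(seq) - 2, 3):
--         if seq[i:i+3] in STOP_CODONS:
--             return i
--     return None
-- ===== Notes on version B (the rewrite author's own statement) =====
-- stated objective: simpler
-- what changed: Replaced the three separate full in-frame scans (one per stop codon) plus a results list and min() with a single forward in-frame pass that returns the first position whose codon is any stop codon.
import Mathlib
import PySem

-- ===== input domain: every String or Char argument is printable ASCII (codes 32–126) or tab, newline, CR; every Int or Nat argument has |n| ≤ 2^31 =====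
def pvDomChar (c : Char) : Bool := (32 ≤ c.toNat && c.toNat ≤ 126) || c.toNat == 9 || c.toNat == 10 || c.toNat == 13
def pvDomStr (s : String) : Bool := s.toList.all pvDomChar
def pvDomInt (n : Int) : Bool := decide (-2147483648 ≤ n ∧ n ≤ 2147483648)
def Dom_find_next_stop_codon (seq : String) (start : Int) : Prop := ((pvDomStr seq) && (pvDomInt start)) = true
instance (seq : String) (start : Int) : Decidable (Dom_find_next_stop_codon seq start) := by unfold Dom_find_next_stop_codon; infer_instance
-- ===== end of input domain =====

-- B replaces A's three separate in-frame scans (one per stop codon) + min() with one forward in-frame pass returning the first stop-codon position.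


-- ===== PORT A =====
-- stop_codons = ['TAG', 'TGA', 'TAA']
def stop_codons : List (List Char) := [['T','A','G'], ['T','G','A'], ['T','A','A']]

-- for i in range(start, len(seq)-2, 3): if seq[i:i+3] == codon: return i ; return None
def find_next_codon (seq : List Char) (start : Int) (codon : List Char) : Option Int :=
  (PySem.List.pyRange start ((seq.length : Int) - 2) 3).find?
    (fun i => PySem.List.slice seq (some i) (some (i + 3)) == codon)

def find_next_stop_codon (seq : String) (start : Int) : Option Int :=
  let s := PySem.Chars.upper seq.toList
  let results := stop_codons.foldl
    (fun acc stop_codon =>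
      match find_next_codon s start stop_codon with
      | some pos => acc ++ [pos]
      | none => acc) []
  if 0 < results.length then PySem.List.min? results (fun x => x) else none

-- ===== PORT B =====
def pvStops : PySem.Set (List Char) :=
  PySem.Set.ofList [['T','A','G'], ['T','G','A'], ['T','A','A']]

def find_next_stop_codon_alt (seq : String) (start : Int) : Option Int :=
  let s := PySem.Chars.upper seq.toList
  (PySem.List.pyRange start ((s.length : Int) - 2) 3).find?
    (fun i => PySem.Set.contains pvStops (PySem.List.slice s (some i) (some (i + 3))))

-- ===== PRECONDITION & SPEC =====
def Spec_find_next_stop_codon (seq : String) (start : Int) (out : Option Int) : Prop := out = find_next_stop_codon_alt seq start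
instance (seq : String) (start : Int) (out : Option Int) : Decidable (Spec_find_next_stop_codon seq start out) := by unfold Spec_find_next_stop_codon; infer_instance

-- ===== CLAIM (what is proved, stated in full; the proofs are below) =====
def Claim_equal_find_next_stop_codon : Prop := ∀ (seq : String) (start : Int), Dom_find_next_stop_codon seq start → Spec_find_next_stop_codon seq start (find_next_stop_codon seq start)

-- ===== LEMMAS AND PROOFS =====

-- A's fold over the three codons collects the three (optional) find results in order
lemma fold3 {g : Type} (F : g -> Option Int) (c1 c2 c3 : g) :
    [c1, c2, c3].foldl (fun acc c => match F c with | some pos => acc ++ [pos] | none => acc) [] =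
      (F c1).toList ++ (F c2).toList ++ (F c3).toList := by
  cases h1 : F c1 <;> cases h2 : F c2 <;> cases h3 : F c3 <;> simp [h1, h2, h3]

-- key lemma: on a strictly increasing index list, min over the three first-match
-- positions equals the first position matching any of the three predicates
lemma min3_eq_find (p q r : Int -> Bool) :
    forall (L : List Int), L.Pairwise (fun a b => a < b) ->
    (let rs := (L.find? p).toList ++ (L.find? q).toList ++ (L.find? r).toList
     if 0 < rs.length then PySem.List.min? rs (fun x => x) else none)
      = L.find? (fun i => p i || q i || r i) := by
  intro L hL
  induction L with
  | nil => simp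
  | cons x t ih =>
    have hx : forall y, y ∈ t -> x < y := fun y hy => (List.pairwise_cons.mp hL).1 y hy
    have ht := (List.pairwise_cons.mp hL).2
    by_cases hor : (p x || q x || r x) = true
    · -- some predicate holds at the head: both sides are `some x`
      have hfind : List.find? (fun i => p i || q i || r i) (x :: t) = some x := by
        simp [hor]
      rw [hfind]
      set o1 := (x :: t).find? p with ho1
      set o2 := (x :: t).find? q with ho2
      set o3 := (x :: t).find? r with ho3
      set rs := o1.toList ++ o2.toList ++ o3.toList with hrs
      have hmem : forall (s : Int -> Bool) y, (x :: t).find? s = some y -> y = x ∨ y ∈ t := by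
        intro s y h
        rcases List.mem_cons.mp (List.mem_of_find?_eq_some h) with h' | h'
        · exact Or.inl h'
        · exact Or.inr h'
      have hxin : o1 = some x ∨ o2 = some x ∨ o3 = some x := by
        rcases Bool.or_eq_true_iff.mp hor with h | h
        · rcases Bool.or_eq_true_iff.mp h with h | h
          · exact Or.inl (ho1 ▸ List.find?_cons_of_pos h)
          · exact Or.inr (Or.inl (ho2 ▸ List.find?_cons_of_pos h))
        · exact Or.inr (Or.inr (ho3 ▸ List.find?_cons_of_pos h))
      have hmemrs : forall y, y ∈ rs -> o1 = some y ∨ o2 = some y ∨ o3 = some y := by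
        intro y hy
        rw [hrs] at hy
        simp only [List.mem_append, Option.mem_toList] at hy
        tauto
      have hxrs : x ∈ rs := by
        rw [hrs]; simp only [List.mem_append, Option.mem_toList]; tauto
      have hlow : forall y, y ∈ rs -> x ≤ y := by
        intro y hy
        rcases hmemrs y hy with h | h | h
        · rcases hmem p y (ho1 ▸ h) with h' | h'
          · omega
          · exact le_of_lt (hx y h')
        · rcases hmem q y (ho2 ▸ h) with h' | h'
          · omega
          · exact le_of_lt (hx y h')
        · rcases hmem r y (ho3 ▸ h) with h' | h'
          · omega
          · exact le_of_lt (hx y h')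
      have hne : rs ≠ [] := fun h => by simp [h] at hxrs
      have hlen : 0 < rs.length := List.length_pos_iff.mpr hne
      obtain ⟨m, hm⟩ : ∃ m, PySem.List.min? rs (fun x => x) = some m := by
        cases h : PySem.List.min? rs (fun x => x) with
        | none => exact absurd ((PySem.List.min?_eq_none_iff rs _).mp h) hne
        | some m => exact ⟨m, rfl⟩
      have hmx : m = x := by
        have h1 : x ≤ m := hlow m (PySem.List.min?_mem hm)
        have h2 : m ≤ x := PySem.List.min?_isMin hm x hxrs
        omega
      simp only [if_pos hlen, hm, hmx]
    · -- no predicate holds at the head: reduce to the tail and apply the IH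
      have hp : ¬ p x = true := fun h => hor (by simp [h])
      have hq : ¬ q x = true := fun h => hor (by simp [h])
      have hr : ¬ r x = true := fun h => hor (by simp [h])
      rw [List.find?_cons_of_neg hp, List.find?_cons_of_neg hq, List.find?_cons_of_neg hr,
          List.find?_cons_of_neg (by simpa using hor)]
      exact ih ht

-- the in-frame index list is strictly increasing
lemma pairwise_pyRange3 (a b : Int) : (PySem.List.pyRange a b 3).Pairwise (fun u v => u < v) := by
  rw [PySem.List.pyRange_of_pos a b (by norm_num)]
  rw [List.pairwise_map]
  exact (List.pairwise_lt_range).imp (by intro k k' h; omega)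

-- B's set-membership test is A's three equality tests, disjoined
lemma contains_stops (v : List Char) :
    PySem.Set.contains pvStops v =
      ((v == ['T','A','G']) || (v == ['T','G','A']) || (v == ['T','A','A'])) := by
  have h : pvStops = [['T','A','G'], ['T','G','A'], ['T','A','A']] := by decide
  rw [h]
  simp only [PySem.Set.contains, List.contains, List.elem]
  cases h1 : v == ['T','A','G'] <;> cases h2 : v == ['T','G','A'] <;>
    cases h3 : v == ['T','A','A'] <;> simp

-- ===== VERDICT (by name: the statement is the Claim_ definition above) =====
theorem find_next_stop_codon_spec : Claim_equal_find_next_stop_codon := by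
  intro seq start _
  unfold Spec_find_next_stop_codon find_next_stop_codon find_next_stop_codon_alt
  simp only [stop_codons]
  set s := PySem.Chars.upper seq.toList with hs
  set L := PySem.List.pyRange start ((s.length : Int) - 2) 3 with hL
  rw [fold3 (find_next_codon s start)]
  simp only [find_next_codon, ← hL]
  rw [min3_eq_find _ _ _ L (pairwise_pyRange3 _ _)]
  have hpred : (fun i => PySem.Set.contains pvStops (PySem.List.slice s (some i) (some (i + 3)))) =
      (fun i => (PySem.List.slice s (some i) (some (i + 3)) == ['T','A','G']) ||
                (PySem.List.slice s (some i) (some (i + 3)) == ['T','G','A']) ||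
                (PySem.List.slice s (some i) (some (i + 3)) == ['T','A','A'])) := by
    funext i; exact contains_stops _
  rw [hpred]
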